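-- pv_equiv track=rewrite | github.com/royfisher91-stack/safebite-backend | backend/scripts/product_volume_tracker.py | bucket_product_coverage
-- ===== SOURCE A (Python) =====
-- from typing import Any, Dict, Iterable, List, Optional, Sequence, Tuple
--
-- def bucket_product_coverage(total_products: int, retailer_counts: Dict[str, int]) -> Dict[str, int]:
--     one = 0
--     two_three = 0
--     four_plus = 0
--     zero = max(total_products - len(retailer_counts), 0)
--     for count in retailer_counts.values():
--         if count == 1:
--             one += 1
--         elif 2 <= count <= 3:
--             two_three += 1
--         elif count >= 4:
--             four_plus += 1
--     return {
--         "0 retailers": zero,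
--         "1 retailer": one,
--         "2-3 retailers": two_three,
--         "4+ retailers": four_plus,
--     }
-- ===== SOURCE B (Python) =====
-- def _bisect_left(a, x):
--     lo, hi = 0, len(a)
--     while lo < hi:
--         mid = (lo + hi) // 2
--         if a[mid] < x:
--             lo = mid + 1
--         else:
--             hi = mid
--     return lo
--
--
-- def bucket_product_coverage(total_products, retailer_counts):
--     counts = sorted(retailer_counts.values())
--     n = len(counts)
--     b1 = _bisect_left(counts, 1)
--     b2 = _bisect_left(counts, 2)
--     b4 = _bisect_left(counts, 4)
--     return {
--         "0 retailers": max(total_products - n, 0),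
--         "1 retailer": b2 - b1,
--         "2-3 retailers": b4 - b2,
--         "4+ retailers": n - b4,
--     }
-- ===== Notes on version B (the rewrite author's own statement) =====
-- stated objective: alternative
-- what changed: Instead of classifying each value with an if/elif chain in one accumulating loop, B sorts the values and computes each bucket as the difference of two binary-searched boundary positions (bisect_left at 1, 2 and 4), so no per-element branching on bucket membership happens at all.
import Mathlib
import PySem

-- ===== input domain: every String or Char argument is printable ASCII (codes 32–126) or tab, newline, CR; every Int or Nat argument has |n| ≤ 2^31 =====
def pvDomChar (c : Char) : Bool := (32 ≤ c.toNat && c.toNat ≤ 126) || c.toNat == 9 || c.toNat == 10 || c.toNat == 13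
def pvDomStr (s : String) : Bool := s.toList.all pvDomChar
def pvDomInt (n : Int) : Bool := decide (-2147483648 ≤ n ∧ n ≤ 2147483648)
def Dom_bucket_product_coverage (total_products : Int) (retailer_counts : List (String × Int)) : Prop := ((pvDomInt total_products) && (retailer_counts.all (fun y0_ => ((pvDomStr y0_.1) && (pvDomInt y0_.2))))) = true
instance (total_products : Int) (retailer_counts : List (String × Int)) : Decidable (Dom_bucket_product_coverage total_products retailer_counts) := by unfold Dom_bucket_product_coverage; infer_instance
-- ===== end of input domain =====

-- B replaces A's branching accumulator loop by sorting the values and reading each bucket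
-- off as the difference of two binary-searched boundary positions (alternative algorithm).

-- ===== PORT A =====
-- A's single for-loop over retailer_counts.values(), threading (one, two_three, four_plus).
def bucket_product_coverage (total_products : Int) (retailer_counts : List (String × Int)) : List (String × Int) :=
  let zero := max (total_products - (retailer_counts.length : Int)) 0
  let st := retailer_counts.foldl
    (fun (acc : Int × Int × Int) kv =>
      let count := kv.2
      if count = 1 then (acc.1 + 1, acc.2.1, acc.2.2)
      else if 2 ≤ count ∧ count ≤ 3 then (acc.1, acc.2.1 + 1, acc.2.2)
      else if 4 ≤ count then (acc.1, acc.2.1, acc.2.2 + 1)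
      else acc)
    (0, 0, 0)
  [("0 retailers", zero), ("1 retailer", st.1), ("2-3 retailers", st.2.1), ("4+ retailers", st.2.2)]

-- ===== PORT B =====
-- B: sorted(values), then bucket sizes from bisect_left boundaries at 1, 2 and 4.
-- Source B's hand-written _bisect_left (lo/hi halving loop) is exactly PySem.List.bisectLeft's loop.
def bucket_product_coverage_alt (total_products : Int) (retailer_counts : List (String × Int)) : List (String × Int) :=
  let counts := PySem.List.sorted (retailer_counts.map Prod.snd) (fun x => x) false
  let n : Int := counts.length
  let b1 : Int := PySem.List.bisectLeft counts 1
  let b2 : Int := PySem.List.bisectLeft counts 2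
  let b4 : Int := PySem.List.bisectLeft counts 4
  [("0 retailers", max (total_products - n) 0),
   ("1 retailer", b2 - b1),
   ("2-3 retailers", b4 - b2),
   ("4+ retailers", n - b4)]

-- ===== PRECONDITION & SPEC =====
def Spec_bucket_product_coverage (total_products : Int) (retailer_counts : List (String × Int)) (out : List (String × Int)) : Prop := out = bucket_product_coverage_alt total_products retailer_counts
instance (total_products : Int) (retailer_counts : List (String × Int)) (out : List (String × Int)) : Decidable (Spec_bucket_product_coverage total_products retailer_counts out) := by unfold Spec_bucket_product_coverage; infer_instance

-- ===== CLAIM =====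
def Claim_equal_bucket_product_coverage : Prop := ∀ (total_products : Int) (retailer_counts : List (String × Int)), Dom_bucket_product_coverage total_products retailer_counts → Spec_bucket_product_coverage total_products retailer_counts (bucket_product_coverage total_products retailer_counts)

-- ===== LEMMAS AND PROOFS =====
-- A's fold computes the three bucket counts as countP over the values.
theorem bpc_fold_eq (l : List (String × Int)) (a b c : Int) :
    l.foldl
      (fun (acc : Int × Int × Int) kv =>
        let count := kv.2
        if count = 1 then (acc.1 + 1, acc.2.1, acc.2.2)
        else if 2 ≤ count ∧ count ≤ 3 then (acc.1, acc.2.1 + 1, acc.2.2)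
        else if 4 ≤ count then (acc.1, acc.2.1, acc.2.2 + 1)
        else acc)
      (a, b, c)
    = (a + ((l.map Prod.snd).countP (fun v => v = 1) : Int),
       b + ((l.map Prod.snd).countP (fun v => 2 ≤ v ∧ v ≤ 3) : Int),
       c + ((l.map Prod.snd).countP (fun v => 4 ≤ v) : Int)) := by
  induction l generalizing a b c with
  | nil => simp
  | cons hd tl ih =>
    simp only [List.foldl_cons, List.map_cons, List.countP_cons]
    have e1 : decide (hd.2 = 1) = (if hd.2 = 1 then true else false) := by
      by_cases h : hd.2 = 1 <;> simp [h]
    have e2 : decide (2 ≤ hd.2 ∧ hd.2 ≤ 3) = (if 2 ≤ hd.2 ∧ hd.2 ≤ 3 then true else false) := by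
      by_cases h : 2 ≤ hd.2 ∧ hd.2 ≤ 3 <;> simp [h]
    have e3 : decide (4 ≤ hd.2) = (if 4 ≤ hd.2 then true else false) := by
      by_cases h : 4 ≤ hd.2 <;> simp [h]
    rw [e1, e2, e3]
    split_ifs with h1 h2 h3 h4 h5 h6 h7 h8 h9 <;>
      first
        | (exact absurd rfl (by assumption))
        | (exfalso; omega)
        | (rw [ih]; simp only [Prod.mk.injEq]; refine ⟨?_, ?_, ?_⟩ <;> push_cast <;> ring)

-- If b is a boundary index (everything before b is < x, everything from b on is ≥ x),
-- then countP (· < x) equals b.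
theorem countP_boundary (a : List Int) (x : Int) :
    ∀ b : Nat, b ≤ a.length →
    (∀ j (hj : j < a.length), j < b → a[j] < x) →
    (∀ j (hj : j < a.length), b ≤ j → x ≤ a[j]) →
    a.countP (fun c => c < x) = b := by
  induction a with
  | nil => intro b hb _ _; simp at hb ⊢; omega
  | cons hd tl ih =>
    intro b hb h1 h2
    cases b with
    | zero =>
      rw [List.countP_eq_zero]
      intro c hc
      obtain ⟨j, hj, rfl⟩ := List.mem_iff_getElem.mp hc
      have := h2 j hj (Nat.zero_le _)
      simpa using this
    | succ b' =>
      have hhd : hd < x := h1 0 (by simp) (Nat.succ_pos _)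
      have htl := ih b' (by simpa using hb)
        (fun j hj hjb => by
          have := h1 (j+1) (by simpa using hj) (by omega)
          simpa using this)
        (fun j hj hjb => by
          have := h2 (j+1) (by simpa using hj) (by omega)
          simpa using this)
      simp [htl, hhd]

-- bisect_left on a sorted list returns the count of elements strictly below x.
theorem bl_eq_countP (s : List Int) (hs : s.Pairwise (· ≤ ·)) (x : Int) :
    PySem.List.bisectLeft s x = s.countP (fun c => c < x) := by
  obtain ⟨hle, h1, h2⟩ := PySem.List.bisectLeft_spec s x hs
  exact (countP_boundary s x _ hle h1 h2).symm

theorem countP_split (p q r : Int → Bool)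
    (hpq : ∀ c, p c = (q c || r c)) (hdisj : ∀ c, ¬(q c = true ∧ r c = true)) :
    ∀ l : List Int, l.countP p = l.countP q + l.countP r := by
  intro l
  induction l with
  | nil => simp
  | cons hd tl ih =>
    simp only [List.countP_cons, ih, hpq hd]
    have := hdisj hd
    cases hq : q hd <;> cases hr : r hd <;> simp [hq, hr] at this ⊢ <;> omega

theorem bucket_product_coverage_eq (total_products : Int) (retailer_counts : List (String × Int)) :
    bucket_product_coverage total_products retailer_counts
      = bucket_product_coverage_alt total_products retailer_counts := by
  simp only [bucket_product_coverage, bucket_product_coverage_alt, bpc_fold_eq]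
  set vals := retailer_counts.map Prod.snd with hvals
  set s := PySem.List.sorted vals (fun x => x) false with hs
  have hperm : s.Perm vals := PySem.List.sorted_perm vals (fun x => x) false
  have hpair : s.Pairwise (· ≤ ·) := by
    have := PySem.List.sorted_pairwise vals (fun x => x)
    simpa using this
  have hlen : s.length = retailer_counts.length := by
    rw [hperm.length_eq, hvals, List.length_map]
  have hcount : ∀ p : Int → Bool, s.countP p = vals.countP p := fun p => hperm.countP_eq p
  have e1 : s.countP (fun c => c < 2) = s.countP (fun c => c < 1) + s.countP (fun c => c = 1) := by
    apply countP_split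
    · intro c; by_cases h1 : c < 1 <;> by_cases h2 : c = (1:Int) <;> simp [h1, h2] <;> omega
    · intro c; rintro ⟨h1, h2⟩; simp at h1 h2; omega
  have e2 : s.countP (fun c => c < 4) = s.countP (fun c => c < 2) + s.countP (fun c => 2 ≤ c ∧ c ≤ 3) := by
    apply countP_split
    · intro c; by_cases h1 : c < 2 <;> by_cases h2 : (2:Int) ≤ c ∧ c ≤ 3 <;> simp [h1, h2] <;> omega
    · intro c; rintro ⟨h1, h2⟩; simp at h1 h2; omega
  have e3 : s.length = s.countP (fun c => c < 4) + s.countP (fun c => 4 ≤ c) := by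
    have := countP_split (fun _ => true) (fun c => c < 4) (fun c => 4 ≤ c)
      (by intro c; by_cases h : c < 4 <;> first | (simp [h]; omega) | simp [h])
      (by intro c; rintro ⟨h1, h2⟩; simp at h1 h2; omega) s
    simpa using this
  rw [bl_eq_countP s hpair 1, bl_eq_countP s hpair 2, bl_eq_countP s hpair 4]
  simp only [List.cons.injEq, Prod.mk.injEq, and_true, true_and]
  have c1 := hcount (fun c => decide (c = 1))
  have c2 := hcount (fun c => decide (2 ≤ c ∧ c ≤ 3))
  have c3 := hcount (fun c => decide (4 ≤ c))
  refine ⟨by rw [hlen], ?_, ?_, ?_⟩ <;> omega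

-- ===== VERDICT =====
theorem bucket_product_coverage_spec : Claim_equal_bucket_product_coverage := by
  intro t rc _
  exact bucket_product_coverage_eq t rc
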